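-- pv_equiv track=rewrite | github.com/mpicbg-csbd/detsegtra | segtools/patchmaker.py | perfect_padding
-- ===== SOURCE A (Python) =====
-- def perfect_padding(imgsize, patchsize, minpad=None):
--     n = len(patchsize)
--     mods = [imgsize[i] % patchsize[i] for i in range(n)]
--     p = patchsize
--     m = mods
--
--     def fixmin(x,i):
--         while x < minpad[i]:
--             x += patchsize[i]
--         return x
--
--     def f(i):
--         if m[i]==0:
--             l,r = 0,0
--         else:
--             l,r = (p[i] - m[i]//2, p[i] - (m[i]-m[i]//2))
--         l = fixmin(l,i)
--         r = fixmin(r,i)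
--         return l,r
--
--     pads = [f(i) for i in range(n)]
--     dif = len(imgsize) - len(pads)
--     if dif > 0: pads += [(0,0)]*dif
--     return pads
-- ===== SOURCE B (Python) =====
-- def perfect_padding(imgsize, patchsize, minpad=None):
--     # closed-form bump instead of the repeated-addition while-loop,
--     # single enumerate pass instead of index lists + nested helpers
--     def bump(x, mp, p):
--         return x if x >= mp else x + ((mp - x + p - 1) // p) * p
--     pads = []
--     for i, p in enumerate(patchsize):
--         m = imgsize[i] % p
--         l, r = (0, 0) if m == 0 else (p - m // 2, p - m + m // 2)
--         mp = minpad[i]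
--         pads.append((bump(l, mp, p), bump(r, mp, p)))
--     pads += [(0, 0)] * (len(imgsize) - len(patchsize))
--     return pads
-- ===== Notes on version B (the rewrite author's own statement) =====
-- stated objective: alternative
-- what changed: Replaces the while-loop that repeatedly adds patchsize until the pad reaches minpad with a single closed-form ceiling-division step, and the index/mods double pass with one enumerate pass.
-- outside the precondition, e.g. on perfect_padding([5], [-2], [-100]): A returns [(-1, -2)], B returns [(-1, -2)]
import Mathlib
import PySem

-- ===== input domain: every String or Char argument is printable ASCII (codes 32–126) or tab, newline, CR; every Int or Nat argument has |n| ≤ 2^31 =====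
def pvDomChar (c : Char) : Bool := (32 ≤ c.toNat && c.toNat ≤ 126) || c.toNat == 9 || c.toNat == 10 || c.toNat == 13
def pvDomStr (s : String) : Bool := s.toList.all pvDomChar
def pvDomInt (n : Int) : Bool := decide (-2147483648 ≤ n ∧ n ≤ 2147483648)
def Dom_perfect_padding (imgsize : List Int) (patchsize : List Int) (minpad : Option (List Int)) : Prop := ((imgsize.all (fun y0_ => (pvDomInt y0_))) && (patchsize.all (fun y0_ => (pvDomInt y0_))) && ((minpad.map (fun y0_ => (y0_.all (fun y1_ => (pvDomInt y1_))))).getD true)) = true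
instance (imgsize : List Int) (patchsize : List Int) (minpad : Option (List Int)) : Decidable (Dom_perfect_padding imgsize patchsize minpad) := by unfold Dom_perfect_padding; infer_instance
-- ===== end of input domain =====

-- B replaces A's repeated-addition while-loop by a closed-form ceiling-division bump and
-- A's index/mods double pass by one enumerate pass (alternative; loop count no longer depends on minpad).


-- ===== PORT A =====
-- 'while x < minpad[i]: x += patchsize[i]' as fuelled recursion over the SAME state;
-- fuel (mp - x).toNat suffices exactly when patchsize[i] ≥ 1 (Pre_), where the Python loop terminates
def pvFixLoop (p mp : Int) : Nat → Int → Int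
  | 0, x => x
  | fuel + 1, x => if x < mp then pvFixLoop p mp fuel (x + p) else x

def pvFixmin (p mp x : Int) : Int := pvFixLoop p mp (mp - x).toNat x

def perfect_padding (imgsize : List Int) (patchsize : List Int) (minpad : Option (List Int)) : List (Int × Int) :=
  let n : Int := patchsize.length
  let mods : List Int := (PySem.List.pyRange 0 n 1).map (fun i =>
    PySem.Int.mod (PySem.List.pyGetD imgsize i 0) (PySem.List.pyGetD patchsize i 0))
  let f : Int → Int × Int := fun i =>
    let m := PySem.List.pyGetD mods i 0
    let p := PySem.List.pyGetD patchsize i 0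
    -- minpad=None raises TypeError in Python whenever fixmin runs (n > 0); Pre_ excludes that
    let mp := PySem.List.pyGetD (minpad.getD []) i 0
    let lr := if m = 0 then ((0 : Int), (0 : Int))
              else (p - PySem.Int.floordiv m 2, p - (m - PySem.Int.floordiv m 2))
    (pvFixmin p mp lr.1, pvFixmin p mp lr.2)
  let pads := (PySem.List.pyRange 0 n 1).map f
  let dif : Int := (imgsize.length : Int) - (pads.length : Int)
  if dif > 0 then pads ++ List.replicate dif.toNat ((0 : Int), (0 : Int)) else pads

-- ===== PORT B =====
def pvBump (x mp p : Int) : Int :=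
  if x ≥ mp then x else x + PySem.Int.floordiv (mp - x + p - 1) p * p

def perfect_padding_alt (imgsize : List Int) (patchsize : List Int) (minpad : Option (List Int)) : List (Int × Int) :=
  let pads := (PySem.List.enumerate patchsize 0).map (fun ip =>
    let i := ip.1
    let p := ip.2
    let m := PySem.Int.mod (PySem.List.pyGetD imgsize i 0) p
    let lr := if m = 0 then ((0 : Int), (0 : Int))
              else (p - PySem.Int.floordiv m 2, p - m + PySem.Int.floordiv m 2)
    let mp := PySem.List.pyGetD (minpad.getD []) i 0
    (pvBump lr.1 mp p, pvBump lr.2 mp p))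
  pads ++ List.replicate (imgsize.length - patchsize.length) ((0 : Int), (0 : Int))

-- ===== PRECONDITION & SPEC =====
-- Pre_ excludes exactly the inputs where the Python A does not return normally: non-positive patch
-- sizes (A's while-loop diverges whenever a pad falls below minpad, and patchsize 0 raises
-- ZeroDivisionError; on the few such inputs whose loops never run A returns and B agrees — see cite),
-- imgsize or minpad shorter than patchsize (IndexError), and minpad=None with nonempty patchsize
-- (TypeError); minpad=None with patchsize=[] is admitted via getD [].
def Pre_perfect_padding (imgsize : List Int) (patchsize : List Int) (minpad : Option (List Int)) : Prop :=
  patchsize.length ≤ imgsize.length ∧ patchsize.length ≤ (minpad.getD []).length ∧ ∀ x ∈ patchsize, 1 ≤ x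
instance (imgsize : List Int) (patchsize : List Int) (minpad : Option (List Int)) : Decidable (Pre_perfect_padding imgsize patchsize minpad) := by unfold Pre_perfect_padding; infer_instance

def pvWitness_perfect_padding : List Int × List Int × Option (List Int) := ([10, 7], [4], some [3])

def Spec_perfect_padding (imgsize : List Int) (patchsize : List Int) (minpad : Option (List Int)) (out : List (Int × Int)) : Prop := out = perfect_padding_alt imgsize patchsize minpad
instance (imgsize : List Int) (patchsize : List Int) (minpad : Option (List Int)) (out : List (Int × Int)) : Decidable (Spec_perfect_padding imgsize patchsize minpad out) := by unfold Spec_perfect_padding; infer_instance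

-- ===== CLAIM (what is proved, stated in full; the proofs are below) =====
def Claim_equal_perfect_padding : Prop := ∀ (imgsize : List Int) (patchsize : List Int) (minpad : Option (List Int)), Dom_perfect_padding imgsize patchsize minpad → Pre_perfect_padding imgsize patchsize minpad → Spec_perfect_padding imgsize patchsize minpad (perfect_padding imgsize patchsize minpad)

-- ===== LEMMAS AND PROOFS =====

-- one while-step preserves the closed form
lemma pvBump_step (p mp x : Int) (hp : 1 ≤ p) (hx : x < mp) :
    pvBump (x + p) mp p = pvBump x mp p := by
  unfold pvBump
  rw [PySem.Int.floordiv_eq_ediv_of_pos (by omega), PySem.Int.floordiv_eq_ediv_of_pos (by omega)]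
  by_cases h2 : x + p ≥ mp
  · simp only [h2, if_pos, if_neg (not_le.mpr hx)]
    have h1 : (mp - x + p - 1) / p = 1 := by
      have : mp - x + p - 1 = (mp - x - 1) + 1 * p := by ring
      rw [this, Int.add_mul_ediv_right _ _ (by omega : p ≠ 0)]
      rw [Int.ediv_eq_zero_of_lt (by omega) (by omega)]
      omega
    rw [h1]; ring
  · replace h2 := lt_of_not_ge h2
    simp only [if_neg (not_le.mpr h2), if_neg (not_le.mpr hx)]
    have : mp - x + p - 1 = (mp - (x + p) + p - 1) + 1 * p := by ring
    rw [this, Int.add_mul_ediv_right _ _ (by omega : p ≠ 0)]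
    ring

lemma pvFixLoop_eq (p mp : Int) (hp : 1 ≤ p) :
    ∀ (fuel : Nat) (x : Int), (mp - x).toNat ≤ fuel → pvFixLoop p mp fuel x = pvBump x mp p := by
  intro fuel
  induction fuel with
  | zero =>
      intro x h
      have : mp ≤ x := by omega
      simp [pvFixLoop, pvBump, this]
  | succ f ih =>
      intro x h
      by_cases hx : x < mp
      · have hrec : pvFixLoop p mp (f + 1) x = pvFixLoop p mp f (x + p) := by
          simp [pvFixLoop, hx]
        rw [hrec, ih (x + p) (by omega), pvBump_step p mp x hp hx]
      · simp [pvFixLoop, pvBump, hx, not_lt.mp hx]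

lemma pvFixmin_eq (p mp x : Int) (hp : 1 ≤ p) : pvFixmin p mp x = pvBump x mp p :=
  pvFixLoop_eq p mp hp _ x le_rfl

-- ===== VERDICT (by name: the statement is the Claim_ definition above) =====
-- pointwise agreement of the two per-dimension computations
lemma pv_point (imgsize patchsize : List Int) (minpad : Option (List Int))
    (hpos : ∀ x ∈ patchsize, 1 ≤ x) (i : Int) (h0 : 0 ≤ i) (hn : i < (patchsize.length : Int)) :
    (fun i =>
      (pvFixmin (PySem.List.pyGetD patchsize i 0) (PySem.List.pyGetD (minpad.getD []) i 0)
          (if PySem.List.pyGetD (List.map (fun i => PySem.Int.mod (PySem.List.pyGetD imgsize i 0) (PySem.List.pyGetD patchsize i 0)) (PySem.List.pyRange 0 (patchsize.length:Int))) i 0 = 0 then ((0:Int), (0:Int))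
           else (PySem.List.pyGetD patchsize i 0 - PySem.Int.floordiv (PySem.List.pyGetD (List.map (fun i => PySem.Int.mod (PySem.List.pyGetD imgsize i 0) (PySem.List.pyGetD patchsize i 0)) (PySem.List.pyRange 0 (patchsize.length:Int))) i 0) 2,
                 PySem.List.pyGetD patchsize i 0 - (PySem.List.pyGetD (List.map (fun i => PySem.Int.mod (PySem.List.pyGetD imgsize i 0) (PySem.List.pyGetD patchsize i 0)) (PySem.List.pyRange 0 (patchsize.length:Int))) i 0 - PySem.Int.floordiv (PySem.List.pyGetD (List.map (fun i => PySem.Int.mod (PySem.List.pyGetD imgsize i 0) (PySem.List.pyGetD patchsize i 0)) (PySem.List.pyRange 0 (patchsize.length:Int))) i 0) 2))).1,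
       pvFixmin (PySem.List.pyGetD patchsize i 0) (PySem.List.pyGetD (minpad.getD []) i 0)
          (if PySem.List.pyGetD (List.map (fun i => PySem.Int.mod (PySem.List.pyGetD imgsize i 0) (PySem.List.pyGetD patchsize i 0)) (PySem.List.pyRange 0 (patchsize.length:Int))) i 0 = 0 then ((0:Int), (0:Int))
           else (PySem.List.pyGetD patchsize i 0 - PySem.Int.floordiv (PySem.List.pyGetD (List.map (fun i => PySem.Int.mod (PySem.List.pyGetD imgsize i 0) (PySem.List.pyGetD patchsize i 0)) (PySem.List.pyRange 0 (patchsize.length:Int))) i 0) 2,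
                 PySem.List.pyGetD patchsize i 0 - (PySem.List.pyGetD (List.map (fun i => PySem.Int.mod (PySem.List.pyGetD imgsize i 0) (PySem.List.pyGetD patchsize i 0)) (PySem.List.pyRange 0 (patchsize.length:Int))) i 0 - PySem.Int.floordiv (PySem.List.pyGetD (List.map (fun i => PySem.Int.mod (PySem.List.pyGetD imgsize i 0) (PySem.List.pyGetD patchsize i 0)) (PySem.List.pyRange 0 (patchsize.length:Int))) i 0) 2))).2)) i
    = (((fun ip : Int × Int =>
        (pvBump (if PySem.Int.mod (PySem.List.pyGetD imgsize ip.1 0) ip.2 = 0 then ((0:Int), (0:Int))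
                 else (ip.2 - PySem.Int.floordiv (PySem.Int.mod (PySem.List.pyGetD imgsize ip.1 0) ip.2) 2,
                       ip.2 - PySem.Int.mod (PySem.List.pyGetD imgsize ip.1 0) ip.2 + PySem.Int.floordiv (PySem.Int.mod (PySem.List.pyGetD imgsize ip.1 0) ip.2) 2)).1
           (PySem.List.pyGetD (minpad.getD []) ip.1 0) ip.2,
         pvBump (if PySem.Int.mod (PySem.List.pyGetD imgsize ip.1 0) ip.2 = 0 then ((0:Int), (0:Int))
                 else (ip.2 - PySem.Int.floordiv (PySem.Int.mod (PySem.List.pyGetD imgsize ip.1 0) ip.2) 2,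
                       ip.2 - PySem.Int.mod (PySem.List.pyGetD imgsize ip.1 0) ip.2 + PySem.Int.floordiv (PySem.Int.mod (PySem.List.pyGetD imgsize ip.1 0) ip.2) 2)).2
           (PySem.List.pyGetD (minpad.getD []) ip.1 0) ip.2)) ∘
      (fun j => (j, PySem.List.pyGetD patchsize j 0))) i) := by
  have hp : 1 ≤ PySem.List.pyGetD patchsize i 0 := by
    rw [PySem.List.pyGetD_eq_getElem patchsize 0 h0 hn]
    exact hpos _ (List.getElem_mem _)
  simp only [Function.comp]
  rw [PySem.List.pyGetD_map_pyRange_of_nonneg _ _ _ _ h0 hn]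
  rw [pvFixmin_eq _ _ _ hp, pvFixmin_eq _ _ _ hp]
  split_ifs with hm
  · rfl
  · have hr : PySem.List.pyGetD patchsize i 0 -
        (PySem.Int.mod (PySem.List.pyGetD imgsize i 0) (PySem.List.pyGetD patchsize i 0) -
          PySem.Int.floordiv (PySem.Int.mod (PySem.List.pyGetD imgsize i 0) (PySem.List.pyGetD patchsize i 0)) 2) =
        PySem.List.pyGetD patchsize i 0 -
          PySem.Int.mod (PySem.List.pyGetD imgsize i 0) (PySem.List.pyGetD patchsize i 0) +
          PySem.Int.floordiv (PySem.Int.mod (PySem.List.pyGetD imgsize i 0) (PySem.List.pyGetD patchsize i 0)) 2 := by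
      ring
    rw [hr]

theorem perfect_padding_spec : Claim_equal_perfect_padding := by
  intro imgsize patchsize minpad _ hpre
  obtain ⟨hlen, hmplen, hpos⟩ := hpre
  unfold Spec_perfect_padding perfect_padding perfect_padding_alt
  simp only [PySem.List.enumerate_eq_map_pyRange (d := (0:Int)), List.map_map, List.length_map,
    PySem.List.length_pyRange_one, PySem.List.len_eq, Int.sub_zero, Int.toNat_natCast]
  have hmain : ∀ (gA gB : Int → Int × Int),
      (∀ i, 0 ≤ i → i < (patchsize.length : Int) → gA i = gB i) →
      List.map gA (PySem.List.pyRange 0 (patchsize.length : Int)) =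
      List.map gB (PySem.List.pyRange 0 (patchsize.length : Int)) := by
    intro gA gB h
    apply List.map_congr_left
    intro i hi
    rw [PySem.List.mem_pyRange_one] at hi
    exact h i hi.1 hi.2
  by_cases hgt : ((imgsize.length : Int) - (patchsize.length : Int) > 0)
  · rw [if_pos hgt]
    congr 1
    · apply hmain
      intro i h0 hn
      exact pv_point imgsize patchsize minpad hpos i h0 hn
    · congr 1
      omega
  · rw [if_neg hgt]
    have h0 : imgsize.length - patchsize.length = 0 := by omega
    rw [h0]
    simp only [List.replicate_zero, List.append_nil]
    apply hmain
    intro i h0 hn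
    exact pv_point imgsize patchsize minpad hpos i h0 hn
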